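-- pv_equiv track=rewrite | github.com/JoaoZati/entrevistas-tecnica | modulo_entrevista_tecnica_devpro/conjuntos/board_game.py | has_move
-- ===== SOURCE A (Python) =====
-- EMPTY = 'E'
--
-- def has_move(board, line, column):
--     """
--     Show all moves can be done
--
--     :param board: matrix m x n
--     :param line: index line
--     :param column: index column
--     :return: True or False
--
--     O(m*n) in time and space
--     """
--
--     m = len(board)
--     if m == 0:
--         raise Exception('Board must be one line at least')
--     n = len(board[0])
--     if n == 0:
--         raise Exception('Board must be one line at least')
--     color = board[line][column]
--     if color == EMPTY:
--         raise Exception('Initial position can be EMPTY')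
--
--     def adjacents(position):
--         def interval(value, max_value):
--             return range(max(value - 1, 0), min(value + 2, max_value))
--
--         p_line, p_column = position
--         line_interval = interval(p_line, m)
--         column_interval = interval(p_column, n)
--
--         return [(l, c) for l in line_interval for c in column_interval]
--
--     def has_empty_adjacents(position):
--         return any(board[p_line][p_column] == EMPTY for p_line, p_column in adjacents(position))
--
--     def adjacents_with_same_color(position):
--         return [(l, c) for l, c in adjacents(position) if color==board[l][c] ]
--
--     to_be_visited = set([(line, column)])
--     visited = set()
--
--     while len(to_be_visited) > 0:
--         curr_position = to_be_visited.pop()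
--         if has_empty_adjacents(curr_position):
--             return True
--         visited.add(curr_position)
--         for p in adjacents_with_same_color(curr_position):
--             if p not in visited:
--                 to_be_visited.add(p)
--
--     return False
-- ===== SOURCE B (Python) =====
-- EMPTY = 'E'
--
--
-- def has_move(board, line, column):
--     m = len(board)
--     if m == 0:
--         raise Exception('Board must be one line at least')
--     n = len(board[0])
--     if n == 0:
--         raise Exception('Board must be one line at least')
--     color = board[line][column]
--     if color == EMPTY:
--         raise Exception('Initial position can be EMPTY')
--
--     def neighbors(l, c):
--         return [(a, b)
--                 for a in range(max(l - 1, 0), min(l + 2, m))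
--                 for b in range(max(c - 1, 0), min(c + 2, n))]
--
--     # pass 1: collect the whole same-color component, breadth-first by levels
--     component = [(line, column)]
--     frontier = [(line, column)]
--     seen = {(line, column)}
--     while frontier:
--         new_frontier = []
--         for (l, c) in frontier:
--             for q in neighbors(l, c):
--                 if q not in seen and board[q[0]][q[1]] == color:
--                     seen.add(q)
--                     new_frontier.append(q)
--         component += new_frontier
--         frontier = new_frontier
--
--     # pass 2: scan the component for a cell with an empty neighbor
--     return any(board[a][b] == EMPTY
--                for (l, c) in component
--                for (a, b) in neighbors(l, c))
-- ===== Notes on version B (the rewrite author's own statement) =====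
-- stated objective: alternative
-- what changed: A's early-returning set-worklist search (pop a cell, test it for an empty neighbor, push unvisited same-color neighbors) is replaced by a two-pass decomposition: a while-loop first collects the whole same-color connected component breadth-first by levels, then the component is scanned for a cell with an empty neighbor.
-- outside the precondition, e.g. on has_move([['a', 'b'], ['b', 'b'], ['c']], 0, 0): A returns False, B returns False; on has_move([['a', 'E', 'x'], ['a', 'a']], 0, 0): A returns True, B raises IndexError
import Mathlib
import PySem

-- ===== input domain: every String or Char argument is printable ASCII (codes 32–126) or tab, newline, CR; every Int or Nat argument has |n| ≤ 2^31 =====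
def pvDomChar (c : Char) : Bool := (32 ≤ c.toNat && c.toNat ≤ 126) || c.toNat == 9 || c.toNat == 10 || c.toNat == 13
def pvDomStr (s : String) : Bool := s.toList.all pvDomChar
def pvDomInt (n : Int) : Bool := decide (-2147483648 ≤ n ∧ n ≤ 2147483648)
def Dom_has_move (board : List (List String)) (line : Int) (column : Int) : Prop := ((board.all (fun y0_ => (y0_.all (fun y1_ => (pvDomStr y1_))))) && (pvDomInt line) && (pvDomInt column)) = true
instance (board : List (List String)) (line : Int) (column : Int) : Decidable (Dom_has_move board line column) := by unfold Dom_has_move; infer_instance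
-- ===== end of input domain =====

-- B replaces A's early-returning set-worklist search by two passes: collect the whole
-- same-color component breadth-first by levels, then scan it for an empty neighbor
-- (objective: alternative decomposition, same asymptotic cost).

-- ===== PORT A =====

def pvIntervalA (value maxValue : Int) : List Int :=
  PySem.List.pyRange (max (value - 1) 0) (min (value + 2) maxValue) 1

def pvAdjacentsA (m n : Int) (position : Int × Int) : List (Int × Int) :=
  (pvIntervalA position.1 m).flatMap (fun l => (pvIntervalA position.2 n).map (fun c => (l, c)))

-- board[p.1][p.2]; the "" default is a totality guard only: Pre_ keeps every access in range
def pvCellA (board : List (List String)) (p : Int × Int) : String :=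
  ((PySem.List.pyGet? board p.1).bind (fun row => PySem.List.pyGet? row p.2)).getD ""

def pvHasEmptyAdjacentsA (board : List (List String)) (m n : Int) (position : Int × Int) : Bool :=
  (pvAdjacentsA m n position).any (fun q => pvCellA board q == "E")

def pvAdjSameColorA (board : List (List String)) (m n : Int) (color : String)
    (position : Int × Int) : List (Int × Int) :=
  (pvAdjacentsA m n position).filter (fun q => color == pvCellA board q)

-- the while-loop; set.pop is modelled as taking the first element (the Boolean result is
-- proved independent of the pop order); the fuel only makes the recursion structural and is
-- chosen large enough to never run out (each iteration pops a position never popped before)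
def pvLoopA (board : List (List String)) (m n : Int) (color : String) :
    Nat → PySem.Set (Int × Int) → PySem.Set (Int × Int) → Bool
  | fuel, toBeVisited, visited =>
    match toBeVisited with
    | [] => false
    | curr :: rest =>
      match fuel with
      | 0 => false
      | fuel + 1 =>
        if pvHasEmptyAdjacentsA board m n curr then true
        else
          let visited' := PySem.Set.add visited curr
          pvLoopA board m n color fuel
            ((pvAdjSameColorA board m n color curr).foldl
              (fun s p => if PySem.Set.contains visited' p then s else PySem.Set.add s p) rest)
            visited'

def has_move (board : List (List String)) (line : Int) (column : Int) : Bool :=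
  let m : Int := board.length
  if m == 0 then false  -- Python raises here (outside Pre_)
  else
    let n : Int := board.headI.length
    if n == 0 then false  -- Python raises here (outside Pre_)
    else
      let color := pvCellA board (line, column)
      if color == "E" then false  -- Python raises here (outside Pre_)
      else
        pvLoopA board m n color (board.length * board.headI.length + 2)
          (PySem.Set.ofList [(line, column)]) PySem.Set.empty

-- ===== PORT B =====

def pvNeighborsB (m n l c : Int) : List (Int × Int) :=
  (PySem.List.pyRange (max (l - 1) 0) (min (l + 2) m) 1).flatMap (fun a =>
    (PySem.List.pyRange (max (c - 1) 0) (min (c + 2) n) 1).map (fun b => (a, b)))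

def pvCellB (board : List (List String)) (a b : Int) : String :=
  ((PySem.List.pyGet? board a).bind (fun row => PySem.List.pyGet? row b)).getD ""

-- one body iteration of B's while-loop: state = (component, frontier, seen)
def pvRoundB (board : List (List String)) (m n : Int) (color : String)
    (st : List (Int × Int) × List (Int × Int) × PySem.Set (Int × Int)) :
    List (Int × Int) × List (Int × Int) × PySem.Set (Int × Int) :=
  let r := st.2.1.foldl
    (fun acc p => (pvNeighborsB m n p.1 p.2).foldl
      (fun (acc : PySem.Set (Int × Int) × List (Int × Int)) q =>
        if !PySem.Set.contains acc.1 q && (pvCellB board q.1 q.2 == color)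
        then (PySem.Set.add acc.1 q, acc.2 ++ [q]) else acc)
      acc)
    (st.2.2, ([] : List (Int × Int)))
  (st.1 ++ r.2, r.2, r.1)

-- B's 'while frontier:' loop; the fuel only makes the recursion structural and is chosen
-- large enough to never run out (each level strictly grows the nodup component)
def pvLevelsB (board : List (List String)) (m n : Int) (color : String) :
    Nat → (List (Int × Int) × List (Int × Int) × PySem.Set (Int × Int)) →
      List (Int × Int) × List (Int × Int) × PySem.Set (Int × Int)
  | fuel, st =>
    match st.2.1 with
    | [] => st
    | _ :: _ =>
      match fuel with
      | 0 => st
      | fuel + 1 => pvLevelsB board m n color fuel (pvRoundB board m n color st)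

def has_move_alt (board : List (List String)) (line : Int) (column : Int) : Bool :=
  let m : Int := board.length
  if m == 0 then false  -- Python raises here (outside Pre_)
  else
    let n : Int := board.headI.length
    if n == 0 then false  -- Python raises here (outside Pre_)
    else
      let color := pvCellB board line column
      if color == "E" then false  -- Python raises here (outside Pre_)
      else
        let st := pvLevelsB board m n color (board.length * board.headI.length + 1)
          ([(line, column)], [(line, column)], PySem.Set.ofList [(line, column)])
        st.1.any (fun p => (pvNeighborsB m n p.1 p.2).any (fun q => pvCellB board q.1 q.2 == "E"))

-- ===== PRECONDITION & SPEC =====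

-- Pre_ excludes the inputs where Python A raises: empty board / empty first row / start cell
-- EMPTY (explicit raise), start indices outside Python's range (IndexError), and boards with a
-- row shorter than the first row, on which the flood fill can hit an IndexError mid-search; on
-- some such ragged boards A happens to return before reaching the short row while B's
-- collect-first pass reaches it and raises, so all of them are excluded.
def Pre_has_move (board : List (List String)) (line : Int) (column : Int) : Prop :=
  0 < board.length ∧ 0 < board.headI.length ∧
  (∀ row ∈ board, board.headI.length ≤ row.length) ∧
  PySem.Raise.InRange board.length line ∧
  PySem.Raise.InRange board.headI.length column ∧
  ((PySem.List.pyGet? board line).bind (fun row => PySem.List.pyGet? row column)).getD "" ≠ "E"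

instance (board : List (List String)) (line : Int) (column : Int) :
    Decidable (Pre_has_move board line column) := by unfold Pre_has_move; infer_instance

def pvWitness_has_move : List (List String) × Int × Int := ([[ "a" ]], 0, 0)

def Spec_has_move (board : List (List String)) (line : Int) (column : Int) (out : Bool) : Prop := out = has_move_alt board line column
instance (board : List (List String)) (line : Int) (column : Int) (out : Bool) : Decidable (Spec_has_move board line column out) := by unfold Spec_has_move; infer_instance

-- ===== CLAIM (what is proved, stated in full; the proofs are below) =====
def Claim_equal_has_move : Prop := ∀ (board : List (List String)) (line : Int) (column : Int), Dom_has_move board line column → Pre_has_move board line column → Spec_has_move board line column (has_move board line column)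

-- ===== LEMMAS AND PROOFS =====

-- the positions reachable from the start cell through same-color adjacency
inductive pvReach (board : List (List String)) (m n : Int) (color : String)
    (start : Int × Int) : Int × Int → Prop
  | refl : pvReach board m n color start start
  | step {p q : Int × Int} : pvReach board m n color start p → q ∈ pvAdjacentsA m n p →
      pvCellA board q = color → pvReach board m n color start q

lemma pvAdjacentsA_box {m n : Int} {p q : Int × Int} (h : q ∈ pvAdjacentsA m n p) :
    0 ≤ q.1 ∧ q.1 < m ∧ 0 ≤ q.2 ∧ q.2 < n := by
  simp only [pvAdjacentsA, pvIntervalA, List.mem_flatMap, List.mem_map] at h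
  obtain ⟨l, hl, c, hc, rfl⟩ := h
  rw [PySem.List.mem_pyRange_one] at hl hc
  refine ⟨?_, ?_, ?_, ?_⟩ <;> simp <;> omega

lemma pvReach_box {board : List (List String)} {m n : Int} {color : String}
    {start p : Int × Int} (h : pvReach board m n color start p) :
    p = start ∨ (0 ≤ p.1 ∧ p.1 < m ∧ 0 ≤ p.2 ∧ p.2 < n) := by
  induction h with
  | refl => exact Or.inl rfl
  | step _ hq _ _ => exact Or.inr (pvAdjacentsA_box hq)

lemma pvReach_card (board : List (List String)) (m n : Int) (color : String)
    (start : Int × Int) (l : List (Int × Int)) (hn : l.Nodup)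
    (hr : ∀ p ∈ l, pvReach board m n color start p) :
    l.length ≤ m.toNat * n.toNat + 1 := by
  have hsub : l.toFinset ⊆ insert start (Finset.Ico (0:Int) m ×ˢ Finset.Ico (0:Int) n) := by
    intro p hp
    rw [List.mem_toFinset] at hp
    rcases pvReach_box (hr p hp) with h | h
    · simp [h]
    · simp only [Finset.mem_insert, Finset.mem_product, Finset.mem_Ico]
      exact Or.inr ⟨⟨h.1, h.2.1⟩, h.2.2.1, h.2.2.2⟩
  calc l.length = l.toFinset.card := (List.toFinset_card_of_nodup hn).symm
    _ ≤ (insert start (Finset.Ico (0:Int) m ×ˢ Finset.Ico (0:Int) n)).card :=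
        Finset.card_le_card hsub
    _ ≤ (Finset.Ico (0:Int) m ×ˢ Finset.Ico (0:Int) n).card + 1 := Finset.card_insert_le _ _
    _ = m.toNat * n.toNat + 1 := by
        rw [Finset.card_product, Int.card_Ico, Int.card_Ico]; simp

lemma pvSetContains_iff {s : List (Int × Int)} {x : Int × Int} :
    PySem.Set.contains s x = true ↔ x ∈ s := by
  simp [PySem.Set.contains]

lemma pvSetAdd_of_not_mem {s : List (Int × Int)} {x : Int × Int} (h : x ∉ s) :
    PySem.Set.add s x = s ++ [x] := by
  simp [PySem.Set.add, PySem.Set.contains, h]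

lemma pvLoopA_fold_mem (visited' : PySem.Set (Int × Int)) (l : List (Int × Int)) :
    ∀ (s : List (Int × Int)) (x : Int × Int),
    (x ∈ l.foldl (fun s p => if PySem.Set.contains visited' p then s else PySem.Set.add s p) s ↔
      x ∈ s ∨ (x ∈ l ∧ x ∉ visited')) := by
  induction l with
  | nil => simp
  | cons a t ih =>
    intro s x
    rw [List.foldl_cons, ih]
    cases hc : PySem.Set.contains visited' a with
    | true =>
      have ha : a ∈ visited' := pvSetContains_iff.mp hc
      simp only [if_true, List.mem_cons]
      constructor
      · rintro (h | h)
        · exact Or.inl h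
        · exact Or.inr ⟨Or.inr h.1, h.2⟩
      · rintro (h | ⟨rfl | h, hnv⟩)
        · exact Or.inl h
        · exact absurd ha hnv
        · exact Or.inr ⟨h, hnv⟩
    | false =>
      have ha : a ∉ visited' := fun h => by rw [pvSetContains_iff.mpr h] at hc; cases hc
      simp only [Bool.false_eq_true, if_false, PySem.Set.mem_add, List.mem_cons]
      constructor
      · rintro ((h | rfl) | h)
        · exact Or.inl h
        · exact Or.inr ⟨Or.inl rfl, ha⟩
        · exact Or.inr ⟨Or.inr h.1, h.2⟩
      · rintro (h | ⟨rfl | h, hnv⟩)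
        · exact Or.inl (Or.inl h)
        · exact Or.inl (Or.inr rfl)
        · exact Or.inr ⟨h, hnv⟩

lemma pvLoopA_fold_nodup (visited' : PySem.Set (Int × Int)) (l : List (Int × Int)) :
    ∀ (s : List (Int × Int)), s.Nodup →
    (l.foldl (fun s p => if PySem.Set.contains visited' p then s else PySem.Set.add s p) s).Nodup := by
  induction l with
  | nil => intro s hs; exact hs
  | cons a t ih =>
    intro s hs
    rw [List.foldl_cons]
    cases hc : PySem.Set.contains visited' a with
    | true => simp only [if_true]; exact ih s hs
    | false =>
      simp only [Bool.false_eq_true, if_false]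
      exact ih _ (PySem.Set.nodup_add s a hs)

lemma pvLoopA_done (board : List (List String)) (m n : Int) (color : String)
    (start : Int × Int) (visited : List (Int × Int))
    (h2 : ∀ p ∈ visited, pvReach board m n color start p ∧
      pvHasEmptyAdjacentsA board m n p = false)
    (h3 : start ∈ visited)
    (h4 : ∀ p ∈ visited, ∀ q ∈ pvAdjacentsA m n p, pvCellA board q = color → q ∈ visited) :
    ¬ ∃ p, pvReach board m n color start p ∧ pvHasEmptyAdjacentsA board m n p = true := by
  rintro ⟨p, hp, he⟩
  have hmem : ∀ r, pvReach board m n color start r → r ∈ visited := by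
    intro r hr
    induction hr with
    | refl => exact h3
    | step hp' hq hc ih => exact h4 _ ih _ hq hc
  rw [(h2 p (hmem p hp)).2] at he
  cases he

lemma pvLoopA_spec (board : List (List String)) (m n : Int) (color : String)
    (start : Int × Int) :
    ∀ (fuel : Nat) (tbv visited : List (Int × Int)),
    (∀ p ∈ tbv, pvReach board m n color start p) →
    tbv.Nodup →
    (∀ p ∈ tbv, p ∉ visited) →
    visited.Nodup →
    (∀ p ∈ visited, pvReach board m n color start p ∧
      pvHasEmptyAdjacentsA board m n p = false) →
    (start ∈ visited ∨ start ∈ tbv) →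
    (∀ p ∈ visited, ∀ q ∈ pvAdjacentsA m n p, pvCellA board q = color →
      q ∈ visited ∨ q ∈ tbv) →
    m.toNat * n.toNat + 1 ≤ fuel + visited.length →
    (pvLoopA board m n color fuel tbv visited = true ↔
      ∃ p, pvReach board m n color start p ∧ pvHasEmptyAdjacentsA board m n p = true) := by
  intro fuel
  induction fuel with
  | zero =>
    intro tbv visited h1 htnd h5 hvnd h2 h3 h4 h8
    match tbv with
    | [] =>
      rw [pvLoopA]
      exact iff_of_false (by simp) (pvLoopA_done board m n color start visited h2
        (h3.resolve_right (by simp)) (fun p hp q hq hc => (h4 p hp q hq hc).resolve_right (by simp)))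
    | curr :: rest =>
      exfalso
      have hcv : curr ∉ visited := h5 curr (List.mem_cons_self ..)
      have hcount := pvReach_card board m n color start (curr :: visited)
        (List.nodup_cons.mpr ⟨hcv, hvnd⟩)
        (by
          intro p hp
          rcases List.mem_cons.mp hp with rfl | hp
          · exact h1 p (List.mem_cons_self ..)
          · exact (h2 p hp).1)
      simp only [List.length_cons] at hcount
      omega
  | succ fuel ih =>
    intro tbv visited h1 htnd h5 hvnd h2 h3 h4 h8
    match tbv with
    | [] =>
      rw [pvLoopA]
      exact iff_of_false (by simp) (pvLoopA_done board m n color start visited h2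
        (h3.resolve_right (by simp)) (fun p hp q hq hc => (h4 p hp q hq hc).resolve_right (by simp)))
    | curr :: rest =>
      have hcv : curr ∉ visited := h5 curr (List.mem_cons_self ..)
      have hcreach : pvReach board m n color start curr := h1 curr (List.mem_cons_self ..)
      rw [pvLoopA]
      cases hemp : pvHasEmptyAdjacentsA board m n curr with
      | true =>
        exact iff_of_true (by simp) ⟨curr, hcreach, hemp⟩
      | false =>
        simp only [Bool.false_eq_true, if_false]
        have hadd : PySem.Set.add visited curr = visited ++ [curr] := pvSetAdd_of_not_mem hcv
        have hmemv' : ∀ x, x ∈ PySem.Set.add visited curr ↔ x ∈ visited ∨ x = curr := by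
          intro x; rw [hadd]; simp
        have hcrest : curr ∉ rest := (List.nodup_cons.mp htnd).1
        have hrestnd : rest.Nodup := (List.nodup_cons.mp htnd).2
        have hsame : ∀ q, q ∈ pvAdjSameColorA board m n color curr ↔
            q ∈ pvAdjacentsA m n curr ∧ pvCellA board q = color := by
          intro q
          simp only [pvAdjSameColorA, List.mem_filter, beq_iff_eq]
          exact ⟨fun ⟨a, b⟩ => ⟨a, b.symm⟩, fun ⟨a, b⟩ => ⟨a, b.symm⟩⟩
        have hftbv := pvLoopA_fold_mem (PySem.Set.add visited curr)
          (pvAdjSameColorA board m n color curr) rest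
        apply ih
        · -- reach on new tbv
          intro p hp
          rcases (hftbv p).mp hp with hp | ⟨hp, _⟩
          · exact h1 p (List.mem_cons_of_mem _ hp)
          · have := (hsame p).mp hp
            exact pvReach.step hcreach this.1 this.2
        · exact pvLoopA_fold_nodup _ _ rest hrestnd
        · -- disjointness from visited'
          intro p hp
          rcases (hftbv p).mp hp with hpr | ⟨_, hnp⟩
          · intro hmem
            rcases (hmemv' p).mp hmem with hv | hpc
            · exact h5 p (List.mem_cons_of_mem _ hpr) hv
            · exact hcrest (hpc ▸ hpr)
          · exact hnp
        · rw [hadd]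
          refine List.Nodup.append hvnd (List.nodup_singleton _) ?_
          intro a ha hb
          rw [List.mem_singleton] at hb
          exact hcv (hb ▸ ha)
        · intro p hp
          rcases (hmemv' p).mp hp with hv | rfl
          · exact h2 p hv
          · exact ⟨hcreach, hemp⟩
        · rcases h3 with hv | hm
          · exact Or.inl ((hmemv' start).mpr (Or.inl hv))
          · rcases List.mem_cons.mp hm with rfl | hm
            · exact Or.inl ((hmemv' start).mpr (Or.inr rfl))
            · exact Or.inr ((hftbv start).mpr (Or.inl hm))
        · -- closure modulo the new worklist
          intro p hp q hq hc
          by_cases hqv : q ∈ PySem.Set.add visited curr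
          · exact Or.inl hqv
          rcases (hmemv' p).mp hp with hv | rfl
          · rcases h4 p hv q hq hc with hq' | hq'
            · exact Or.inl ((hmemv' q).mpr (Or.inl hq'))
            · rcases List.mem_cons.mp hq' with rfl | hq'
              · exact Or.inl ((hmemv' q).mpr (Or.inr rfl))
              · exact Or.inr ((hftbv q).mpr (Or.inl hq'))
          · refine Or.inr ((hftbv q).mpr (Or.inr ⟨(hsame q).mpr ⟨hq, hc⟩, hqv⟩))
        · rw [hadd]
          simp only [List.length_append, List.length_singleton]
          omega

lemma pvCellB_eq (board : List (List String)) (p : Int × Int) :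
    pvCellB board p.1 p.2 = pvCellA board p := rfl

lemma pvNeighborsB_eq (m n : Int) (p : Int × Int) :
    pvNeighborsB m n p.1 p.2 = pvAdjacentsA m n p := rfl

lemma pvInnerB_spec (board : List (List String)) (color : String) (seen0 : List (Int × Int))
    (qs : List (Int × Int)) :
    ∀ (acc : PySem.Set (Int × Int) × List (Int × Int)),
    acc.1 = seen0 ++ acc.2 → acc.1.Nodup →
    ((qs.foldl (fun (acc : PySem.Set (Int × Int) × List (Int × Int)) q =>
        if !PySem.Set.contains acc.1 q && (pvCellB board q.1 q.2 == color)
        then (PySem.Set.add acc.1 q, acc.2 ++ [q]) else acc) acc).1 =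
      seen0 ++ (qs.foldl (fun acc q =>
        if !PySem.Set.contains acc.1 q && (pvCellB board q.1 q.2 == color)
        then (PySem.Set.add acc.1 q, acc.2 ++ [q]) else acc) acc).2 ∧
    (qs.foldl (fun acc q =>
        if !PySem.Set.contains acc.1 q && (pvCellB board q.1 q.2 == color)
        then (PySem.Set.add acc.1 q, acc.2 ++ [q]) else acc) acc).1.Nodup ∧
    (∀ q ∈ qs, pvCellA board q = color → q ∈ (qs.foldl (fun acc q =>
        if !PySem.Set.contains acc.1 q && (pvCellB board q.1 q.2 == color)
        then (PySem.Set.add acc.1 q, acc.2 ++ [q]) else acc) acc).1) ∧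
    (∀ x ∈ (qs.foldl (fun acc q =>
        if !PySem.Set.contains acc.1 q && (pvCellB board q.1 q.2 == color)
        then (PySem.Set.add acc.1 q, acc.2 ++ [q]) else acc) acc).2,
      x ∈ acc.2 ∨ (x ∈ qs ∧ pvCellA board x = color ∧ x ∉ seen0)) ∧
    (∀ x ∈ acc.1, x ∈ (qs.foldl (fun acc q =>
        if !PySem.Set.contains acc.1 q && (pvCellB board q.1 q.2 == color)
        then (PySem.Set.add acc.1 q, acc.2 ++ [q]) else acc) acc).1)) := by
  induction qs with
  | nil => intro acc h1 h2; exact ⟨h1, h2, by simp, fun x hx => Or.inl hx, fun x hx => hx⟩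
  | cons a t ih =>
    intro acc h1 h2
    rw [List.foldl_cons]
    cases hcond : (!PySem.Set.contains acc.1 a && (pvCellB board a.1 a.2 == color)) with
    | false =>
      simp only [Bool.false_eq_true, if_false]
      obtain ⟨g1, g2, g3, g4, g5⟩ := ih acc h1 h2
      refine ⟨g1, g2, ?_, ?_, g5⟩
      · intro q hq hcq
        rcases List.mem_cons.mp hq with rfl | hq
        · -- the guard failed: either q was already in seen, or its color differs
          rcases Bool.and_eq_false_iff.mp hcond with hc | hc
          · have hq1 : PySem.Set.contains acc.1 q = true := by
              revert hc; cases PySem.Set.contains acc.1 q <;> simp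
            exact g5 q (pvSetContains_iff.mp hq1)
          · exfalso
            rw [pvCellB_eq] at hc
            simp [hcq] at hc
        · exact g3 q hq hcq
      · intro x hx
        rcases g4 x hx with hx | hx
        · exact Or.inl hx
        · exact Or.inr ⟨List.mem_cons_of_mem _ hx.1, hx.2⟩
    | true =>
      simp only [if_true]
      have hna : a ∉ acc.1 := by
        rcases Bool.and_eq_true_iff.mp hcond with ⟨hc, -⟩
        intro hmem
        rw [pvSetContains_iff.mpr hmem] at hc
        cases hc
      have hcola : pvCellA board a = color := by
        rcases Bool.and_eq_true_iff.mp hcond with ⟨-, hc⟩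
        rw [pvCellB_eq] at hc
        exact beq_iff_eq.mp hc
      have hadd : PySem.Set.add acc.1 a = acc.1 ++ [a] := pvSetAdd_of_not_mem hna
      have h1' : (PySem.Set.add acc.1 a, acc.2 ++ [a]).1 = seen0 ++ (PySem.Set.add acc.1 a, acc.2 ++ [a]).2 := by
        show PySem.Set.add acc.1 a = seen0 ++ (acc.2 ++ [a])
        rw [hadd, h1, List.append_assoc]
      have h2' : (PySem.Set.add acc.1 a, acc.2 ++ [a]).1.Nodup := by
        simp only [hadd]
        refine List.Nodup.append h2 (List.nodup_singleton _) ?_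
        intro x hx hb
        rw [List.mem_singleton] at hb
        exact hna (hb ▸ hx)
      obtain ⟨g1, g2, g3, g4, g5⟩ := ih _ h1' h2'
      refine ⟨g1, g2, ?_, ?_, ?_⟩
      · intro q hq hcq
        rcases List.mem_cons.mp hq with rfl | hq
        · exact g5 q (by simp [hadd])
        · exact g3 q hq hcq
      · intro x hx
        rcases g4 x hx with hx | hx
        · rcases List.mem_append.mp hx with hx | hx
          · exact Or.inl hx
          · rw [List.mem_singleton] at hx
            refine Or.inr ⟨hx ▸ List.mem_cons_self .., ?_, ?_⟩
            · exact hx ▸ hcola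
            · subst hx
              intro hs
              exact hna (h1 ▸ List.mem_append_left _ hs)
        · exact Or.inr ⟨List.mem_cons_of_mem _ hx.1, hx.2⟩
      · intro x hx
        exact g5 x (by simp [hadd, hx])

lemma pvOuterB_spec (board : List (List String)) (m n : Int) (color : String)
    (seen0 : List (Int × Int)) (ps : List (Int × Int)) :
    ∀ (acc : PySem.Set (Int × Int) × List (Int × Int)),
    acc.1 = seen0 ++ acc.2 → acc.1.Nodup →
    ((ps.foldl (fun acc p => (pvNeighborsB m n p.1 p.2).foldl
      (fun (acc : PySem.Set (Int × Int) × List (Int × Int)) q =>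
        if !PySem.Set.contains acc.1 q && (pvCellB board q.1 q.2 == color)
        then (PySem.Set.add acc.1 q, acc.2 ++ [q]) else acc) acc) acc).1 =
      seen0 ++ (ps.foldl (fun acc p => (pvNeighborsB m n p.1 p.2).foldl
      (fun acc q =>
        if !PySem.Set.contains acc.1 q && (pvCellB board q.1 q.2 == color)
        then (PySem.Set.add acc.1 q, acc.2 ++ [q]) else acc) acc) acc).2 ∧
    (ps.foldl (fun acc p => (pvNeighborsB m n p.1 p.2).foldl
      (fun acc q =>
        if !PySem.Set.contains acc.1 q && (pvCellB board q.1 q.2 == color)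
        then (PySem.Set.add acc.1 q, acc.2 ++ [q]) else acc) acc) acc).1.Nodup ∧
    (∀ p ∈ ps, ∀ q ∈ pvAdjacentsA m n p, pvCellA board q = color →
      q ∈ (ps.foldl (fun acc p => (pvNeighborsB m n p.1 p.2).foldl
      (fun acc q =>
        if !PySem.Set.contains acc.1 q && (pvCellB board q.1 q.2 == color)
        then (PySem.Set.add acc.1 q, acc.2 ++ [q]) else acc) acc) acc).1) ∧
    (∀ x ∈ (ps.foldl (fun acc p => (pvNeighborsB m n p.1 p.2).foldl
      (fun acc q =>
        if !PySem.Set.contains acc.1 q && (pvCellB board q.1 q.2 == color)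
        then (PySem.Set.add acc.1 q, acc.2 ++ [q]) else acc) acc) acc).2,
      x ∈ acc.2 ∨ ((∃ p ∈ ps, x ∈ pvAdjacentsA m n p) ∧ pvCellA board x = color ∧ x ∉ seen0)) ∧
    (∀ x ∈ acc.1, x ∈ (ps.foldl (fun acc p => (pvNeighborsB m n p.1 p.2).foldl
      (fun acc q =>
        if !PySem.Set.contains acc.1 q && (pvCellB board q.1 q.2 == color)
        then (PySem.Set.add acc.1 q, acc.2 ++ [q]) else acc) acc) acc).1)) := by
  induction ps with
  | nil => intro acc h1 h2; exact ⟨h1, h2, by simp, fun x hx => Or.inl hx, fun x hx => hx⟩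
  | cons a t ih =>
    intro acc h1 h2
    rw [List.foldl_cons]
    obtain ⟨f1, f2, f3, f4, f5⟩ := pvInnerB_spec board color seen0 (pvNeighborsB m n a.1 a.2) acc h1 h2
    obtain ⟨g1, g2, g3, g4, g5⟩ := ih _ f1 f2
    refine ⟨g1, g2, ?_, ?_, fun x hx => g5 x (f5 x hx)⟩
    · intro p hp q hq hcq
      rcases List.mem_cons.mp hp with rfl | hp
      · exact g5 q (f3 q (by rw [pvNeighborsB_eq]; exact hq) hcq)
      · exact g3 p hp q hq hcq
    · intro x hx
      rcases g4 x hx with hx | hx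
      · rcases f4 x hx with hx | hx
        · exact Or.inl hx
        · rw [pvNeighborsB_eq] at hx
          exact Or.inr ⟨⟨a, List.mem_cons_self .., hx.1⟩, hx.2⟩
      · obtain ⟨⟨p, hp, hxp⟩, hcx, hsx⟩ := hx
        exact Or.inr ⟨⟨p, List.mem_cons_of_mem _ hp, hxp⟩, hcx, hsx⟩

-- the invariant of B's level-by-level collection: state = (component, frontier, seen)
def pvInvB (board : List (List String)) (m n : Int) (color : String) (start : Int × Int)
    (st : List (Int × Int) × List (Int × Int) × PySem.Set (Int × Int)) : Prop :=
  (∀ x ∈ st.2.1, x ∈ st.1) ∧ start ∈ st.1 ∧ (∀ x, x ∈ st.2.2 ↔ x ∈ st.1) ∧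
  st.1.Nodup ∧ st.2.2.Nodup ∧
  (∀ p ∈ st.1, pvReach board m n color start p) ∧
  (∀ p ∈ st.1, p ∉ st.2.1 → ∀ q ∈ pvAdjacentsA m n p, pvCellA board q = color → q ∈ st.1)

lemma pvRoundB_inv (board : List (List String)) (m n : Int) (color : String)
    (start : Int × Int) (st : List (Int × Int) × List (Int × Int) × PySem.Set (Int × Int))
    (h : pvInvB board m n color start st) :
    pvInvB board m n color start (pvRoundB board m n color st) := by
  obtain ⟨comp, fr, seen⟩ := st
  obtain ⟨i1, i2, i3, i4, i5, i6, i7⟩ := h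
  obtain ⟨g1, g2, g3, g4, g5⟩ := pvOuterB_spec board m n color seen fr (seen, ([] : List (Int × Int)))
    (by simp) i5
  dsimp only at i1 i2 i3 i4 i5 i6 i7 g1 g2 g3 g4 g5 ⊢
  unfold pvRoundB
  dsimp only
  set r := fr.foldl (fun acc p => (pvNeighborsB m n p.1 p.2).foldl
      (fun (acc : PySem.Set (Int × Int) × List (Int × Int)) q =>
        if !PySem.Set.contains acc.1 q && (pvCellB board q.1 q.2 == color)
        then (PySem.Set.add acc.1 q, acc.2 ++ [q]) else acc) acc) (seen, ([] : List (Int × Int)))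
    with hr
  have hmem1 : ∀ x, x ∈ r.1 ↔ x ∈ comp ++ r.2 := by
    intro x
    rw [g1, List.mem_append, List.mem_append, i3 x]
  have hnodup2 : (comp ++ r.2).Nodup := by
    rw [g1] at g2
    refine List.Nodup.append i4 (List.Nodup.of_append_right g2) ?_
    intro x hx hx2
    exact (List.disjoint_of_nodup_append g2) ((i3 x).mpr hx) hx2
  refine ⟨?_, ?_, ?_, ?_, ?_, ?_, ?_⟩
  · intro x hx; exact List.mem_append_right _ hx
  · exact List.mem_append_left _ i2
  · exact hmem1
  · exact hnodup2
  · exact g2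
  · intro p hp
    rcases List.mem_append.mp hp with hp | hp
    · exact i6 p hp
    · rcases g4 p hp with hp' | ⟨⟨p', hp', hpp'⟩, hc, -⟩
      · cases hp'
      · exact pvReach.step (i6 p' (i1 p' hp')) hpp' hc
  · intro p hp hnf q hq hcq
    rcases List.mem_append.mp hp with hp | hp
    · by_cases hpf : p ∈ fr
      · exact (hmem1 q).mp (g3 p hpf q hq hcq)
      · exact List.mem_append_left _ (i7 p hp hpf q hq hcq)
    · exact absurd hp hnf

lemma pvRoundB_len (board : List (List String)) (m n : Int) (color : String)
    (st : List (Int × Int) × List (Int × Int) × PySem.Set (Int × Int)) :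
    (pvRoundB board m n color st).1.length =
      st.1.length + (pvRoundB board m n color st).2.1.length := by
  unfold pvRoundB
  simp [List.length_append]

lemma pvLevelsB_inv (board : List (List String)) (m n : Int) (color : String)
    (start : Int × Int) (fuel : Nat) :
    ∀ (st : List (Int × Int) × List (Int × Int) × PySem.Set (Int × Int)),
    pvInvB board m n color start st →
    pvInvB board m n color start (pvLevelsB board m n color fuel st) := by
  induction fuel with
  | zero =>
    intro st h
    rw [pvLevelsB]
    match hfr : st.2.1 with
    | [] => exact h
    | _ :: _ => exact h
  | succ fuel ih =>
    intro st h
    rw [pvLevelsB]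
    match hfr : st.2.1 with
    | [] => exact h
    | _ :: _ => exact ih _ (pvRoundB_inv board m n color start st h)

-- if the frontier is already empty, the while-loop does not run
lemma pvLevelsB_nil (board : List (List String)) (m n : Int) (color : String) (fuel : Nat)
    (st : List (Int × Int) × List (Int × Int) × PySem.Set (Int × Int))
    (h : st.2.1 = []) : pvLevelsB board m n color fuel st = st := by
  cases fuel <;> · rw [pvLevelsB]; rw [h]

-- after the while-loop: either the frontier is exhausted, or the component grew by fuel
lemma pvLevelsB_post (board : List (List String)) (m n : Int) (color : String) (fuel : Nat) :
    ∀ (st : List (Int × Int) × List (Int × Int) × PySem.Set (Int × Int)),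
    (pvLevelsB board m n color fuel st).2.1 = [] ∨
      st.1.length + fuel ≤ (pvLevelsB board m n color fuel st).1.length := by
  induction fuel with
  | zero =>
    intro st
    rw [pvLevelsB]
    match hfr : st.2.1 with
    | [] => exact Or.inl hfr
    | _ :: _ =>
      refine Or.inr ?_
      show st.1.length + 0 ≤ st.1.length
      omega
  | succ fuel ih =>
    intro st
    rw [pvLevelsB]
    match hfr : st.2.1 with
    | [] => exact Or.inl hfr
    | x :: xs =>
      have hlen := pvRoundB_len board m n color st
      by_cases hnf : (pvRoundB board m n color st).2.1 = []
      · rw [pvLevelsB_nil board m n color fuel _ hnf]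
        exact Or.inl hnf
      · rcases ih (pvRoundB board m n color st) with h | h
        · exact Or.inl h
        · have hpos : 0 < (pvRoundB board m n color st).2.1.length :=
            List.length_pos_of_ne_nil hnf
          refine Or.inr ?_
          show st.1.length + (fuel + 1) ≤
            (pvLevelsB board m n color fuel (pvRoundB board m n color st)).1.length
          omega

lemma pvComponentB_spec (board : List (List String)) (m n : Int) (color : String)
    (start : Int × Int) :
    (∀ p ∈ (pvLevelsB board m n color (m.toNat * n.toNat + 1)
        ([start], [start], PySem.Set.ofList [start])).1,
      pvReach board m n color start p) ∧
    (∀ p, pvReach board m n color start p →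
      p ∈ (pvLevelsB board m n color (m.toNat * n.toNat + 1)
        ([start], [start], PySem.Set.ofList [start])).1) := by
  have hinv0 : pvInvB board m n color start ([start], [start], PySem.Set.ofList [start]) := by
    refine ⟨by simp, by simp, ?_, by simp, PySem.Set.nodup_ofList _, ?_, ?_⟩
    · intro x; rw [PySem.Set.mem_ofList]
    · intro p hp
      rw [List.mem_singleton] at hp
      exact hp ▸ pvReach.refl
    · intro p hp hnp
      exact absurd hp hnp
  have hinv := pvLevelsB_inv board m n color start (m.toNat * n.toNat + 1) _ hinv0
  obtain ⟨i1, i2, i3, i4, i5, i6, i7⟩ := hinv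
  have hfr : (pvLevelsB board m n color (m.toNat * n.toNat + 1)
      ([start], [start], PySem.Set.ofList [start])).2.1 = [] := by
    rcases pvLevelsB_post board m n color (m.toNat * n.toNat + 1)
      ([start], [start], PySem.Set.ofList [start]) with h | h
    · exact h
    · exfalso
      have hcard := pvReach_card board m n color start _ i4 i6
      simp only [List.length_singleton] at h
      omega
  refine ⟨i6, ?_⟩
  intro p hp
  induction hp with
  | refl => exact i2
  | step hp' hq hc ih => exact i7 _ ih (by rw [hfr]; exact List.not_mem_nil) _ hq hc

-- ===== VERDICT =====
theorem has_move_spec : Claim_equal_has_move := by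
  intro board line column hDom hPre
  obtain ⟨hm, hn, hrect, hlr, hcr, hcol⟩ := hPre
  unfold Spec_has_move
  have hmi : (((board.length : Int)) == 0) = false := by rw [beq_eq_false_iff_ne]; omega
  have hni : (((board.headI.length : Int)) == 0) = false := by rw [beq_eq_false_iff_ne]; omega
  have hcolA : pvCellA board (line, column) ≠ "E" := hcol
  have hcolAf : (pvCellA board (line, column) == "E") = false := by
    rw [beq_eq_false_iff_ne]; exact hcolA
  have hcolBf : (pvCellB board line column == "E") = false := hcolAf
  -- A's side reduces to the worklist loop
  have hA : has_move board line column =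
      pvLoopA board (board.length : Int) (board.headI.length : Int)
        (pvCellA board (line, column)) (board.length * board.headI.length + 2)
        [(line, column)] [] := by
    simp only [has_move, hmi, hni, hcolAf, Bool.false_eq_true, if_false]
    rfl
  -- B's side reduces to the while-loop collection followed by the component scan
  have hB : has_move_alt board line column =
      (pvLevelsB board (board.length : Int) (board.headI.length : Int)
          (pvCellA board (line, column)) (board.length * board.headI.length + 1)
        ([(line, column)], [(line, column)], PySem.Set.ofList [(line, column)])).1.any
        (fun p => pvHasEmptyAdjacentsA board (board.length : Int) (board.headI.length : Int) p) := by
    simp only [has_move_alt, hmi, hni, hcolBf, Bool.false_eq_true, if_false]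
    rfl
  have hToNat1 : ((board.length : Int)).toNat = board.length := Int.toNat_natCast _
  have hToNat2 : ((board.headI.length : Int)).toNat = board.headI.length := Int.toNat_natCast _
  have iffA : has_move board line column = true ↔
      ∃ p, pvReach board (board.length : Int) (board.headI.length : Int)
        (pvCellA board (line, column)) (line, column) p ∧
        pvHasEmptyAdjacentsA board (board.length : Int) (board.headI.length : Int) p = true := by
    rw [hA]
    refine pvLoopA_spec board _ _ _ (line, column) _ [(line, column)] []
      ?_ (List.nodup_singleton _) (by simp) List.nodup_nil (by simp) ?_ (by simp) ?_
    · intro p hp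
      rw [List.mem_singleton] at hp
      exact hp ▸ pvReach.refl
    · exact Or.inr (List.mem_singleton_self _)
    · rw [hToNat1, hToNat2]
      simp
  obtain ⟨hsound, hcomplete⟩ := pvComponentB_spec board (board.length : Int)
    (board.headI.length : Int) (pvCellA board (line, column)) (line, column)
  rw [hToNat1, hToNat2] at hsound hcomplete
  have iffB : has_move_alt board line column = true ↔
      ∃ p, pvReach board (board.length : Int) (board.headI.length : Int)
        (pvCellA board (line, column)) (line, column) p ∧
        pvHasEmptyAdjacentsA board (board.length : Int) (board.headI.length : Int) p = true := by
    rw [hB, List.any_eq_true]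
    constructor
    · rintro ⟨p, hp, he⟩
      exact ⟨p, hsound p hp, he⟩
    · rintro ⟨p, hp, he⟩
      exact ⟨p, hcomplete p hp, he⟩
  exact Bool.coe_iff_coe.mp (iffA.trans iffB.symm)
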